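-- pv_equiv track=rewrite | github.com/rathodvamshi/prism_ai | prism-backend/app/services/enhanced_memory_extractor.py | _normalize_language
-- ===== SOURCE A (Python) =====
-- def _normalize_language(value: str) -> str:
--     """Normalize a language name"""
--     # Title case
--     normalized = value.strip().title()
--
--     # Common language names
--     languages = {
--         'English', 'Spanish', 'French', 'German', 'Chinese',
--         'Japanese', 'Korean', 'Portuguese', 'Russian', 'Arabic',
--         'Hindi', 'Italian', 'Dutch', 'Polish', 'Turkish'
--     }
--
--     for lang in languages:
--         if normalized.lower() == lang.lower():
--             return lang
--
--     return normalized
-- ===== SOURCE B (Python) =====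
-- def _normalize_language(value: str) -> str:
--     """Normalize a language name"""
--     # One explicit pass with a word-boundary flag; no builtin title() and no
--     # lookup table: strip+title already yields each canonical name exactly,
--     # so A's set scan is a no-op and is dropped.
--     out = []
--     prev_alpha = False
--     for ch in value.strip():
--         if ch.isalpha():
--             out.append(ch.lower() if prev_alpha else ch.upper())
--             prev_alpha = True
--         else:
--             out.append(ch)
--             prev_alpha = False
--     return ''.join(out)
-- ===== Notes on version B (the rewrite author's own statement) =====
-- stated objective: alternative
-- what changed: Replaced A's two-stage strategy (builtin title() pass, then a case-insensitive scan of a 15-name set — a no-op, since strip+title already yields each canonical name exactly) with a single explicit character loop carrying a word-boundary flag and an output accumulator, no table.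
import Mathlib
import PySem

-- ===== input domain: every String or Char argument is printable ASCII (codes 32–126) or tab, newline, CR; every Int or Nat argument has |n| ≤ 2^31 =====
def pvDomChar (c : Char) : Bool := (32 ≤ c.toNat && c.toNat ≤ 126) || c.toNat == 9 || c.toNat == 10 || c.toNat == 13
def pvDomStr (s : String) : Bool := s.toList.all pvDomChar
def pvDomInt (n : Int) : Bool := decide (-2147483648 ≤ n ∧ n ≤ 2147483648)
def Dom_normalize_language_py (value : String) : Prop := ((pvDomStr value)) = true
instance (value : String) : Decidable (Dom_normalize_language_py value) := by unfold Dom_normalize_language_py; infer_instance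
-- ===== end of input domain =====

-- B drops A's 15-name table and scan (a no-op: strip+title already returns each
-- canonical name exactly) and title-cases in one explicit flagged pass instead
-- of calling title().

-- ===== PORT A =====
-- str.title() (exact for ASCII): a letter after a letter is lowercased, a letter
-- after a non-letter is uppercased, non-letters pass through and reset the boundary.
def pyTitleChars : List Char → Bool → List Char
  | [], _ => []
  | c :: rest, prevCased =>
    if PySem.Chars.isalpha c then
      (if prevCased then PySem.Chars.lowerChar c else PySem.Chars.upperChar c) :: pyTitleChars rest true
    else
      c :: pyTitleChars rest false

-- the 'for lang in languages' scan, in the literal order of A's set literal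
def langScan (normalized : String) : List String → String
  | [] => normalized
  | lang :: rest =>
    if PySem.Str.lower normalized == PySem.Str.lower lang then lang
    else langScan normalized rest

def normalize_language_py (value : String) : String :=
  let normalized := String.ofList (pyTitleChars (PySem.Str.strip value).toList false)
  let languages : List String :=
    ["English", "Spanish", "French", "German", "Chinese",
     "Japanese", "Korean", "Portuguese", "Russian", "Arabic",
     "Hindi", "Italian", "Dutch", "Polish", "Turkish"]
  langScan normalized languages

-- ===== PORT B =====
-- the body of B's for-loop: state = (reversed output accumulator, prev_alpha flag)
def titleStep (st : List Char × Bool) (ch : Char) : List Char × Bool :=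
  if PySem.Chars.isalpha ch then
    ((if st.2 then PySem.Chars.lowerChar ch else PySem.Chars.upperChar ch) :: st.1, true)
  else
    (ch :: st.1, false)

def normalize_language_py_alt (value : String) : String :=
  String.ofList (((PySem.Str.strip value).toList.foldl titleStep ([], false)).1.reverse)

-- ===== PRECONDITION & SPEC =====
def Spec_normalize_language_py (value : String) (out : String) : Prop := out = normalize_language_py_alt value
instance (value : String) (out : String) : Decidable (Spec_normalize_language_py value out) := by unfold Spec_normalize_language_py; infer_instance

-- ===== CLAIM (what is proved, stated in full; the proofs are below) =====
def Claim_equal_normalize_language_py : Prop := ∀ (value : String), Dom_normalize_language_py value → Spec_normalize_language_py value (normalize_language_py value)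

-- ===== LEMMAS AND PROOFS =====

theorem pvLe (a c : Char) : (a ≤ c) ↔ a.toNat ≤ c.toNat := by
  rw [Char.le_def]; exact UInt32.le_iff_toNat_le

theorem pvOf (n : Nat) (h : n < 55296) : (Char.ofNat n).toNat = n := by
  rw [Char.toNat_ofNat, if_pos (Or.inl h)]

theorem pvInj (a b : Char) (h : a.toNat = b.toNat) : a = b := by
  rw [← Char.ofNat_toNat a, ← Char.ofNat_toNat b, h]

theorem pvUpperN (c : Char) : (PySem.Chars.upperChar c).toNat =
    if 97 ≤ c.toNat ∧ c.toNat ≤ 122 then c.toNat - 32 else c.toNat := by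
  unfold PySem.Chars.upperChar PySem.Chars.islower
  have h1 := pvLe 'a' c; have h2 := pvLe c 'z'
  have hz : ('a').toNat = 97 := rfl
  have hz2 : ('z').toNat = 122 := rfl
  rw [hz] at h1; rw [hz2] at h2
  simp only [Bool.and_eq_true, decide_eq_true_eq, h1, h2]
  split_ifs with h
  · exact pvOf _ (by omega)
  · rfl

theorem pvLowerN (c : Char) : (PySem.Chars.lowerChar c).toNat =
    if 65 ≤ c.toNat ∧ c.toNat ≤ 90 then c.toNat + 32 else c.toNat := by
  unfold PySem.Chars.lowerChar PySem.Chars.isupper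
  have h1 := pvLe 'A' c; have h2 := pvLe c 'Z'
  have hz : ('A').toNat = 65 := rfl
  have hz2 : ('Z').toNat = 90 := rfl
  rw [hz] at h1; rw [hz2] at h2
  simp only [Bool.and_eq_true, decide_eq_true_eq, h1, h2]
  split_ifs with h
  · exact pvOf _ (by omega)
  · rfl

theorem pvF1 (c : Char) : PySem.Chars.lowerChar (PySem.Chars.upperChar c) = PySem.Chars.lowerChar c := by
  apply pvInj; simp only [pvLowerN, pvUpperN]; split_ifs <;> omega

theorem pvF3 (c : Char) : PySem.Chars.upperChar (PySem.Chars.lowerChar c) = PySem.Chars.upperChar c := by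
  apply pvInj; simp only [pvUpperN, pvLowerN]; split_ifs <;> omega

theorem pvF4 (c : Char) : PySem.Chars.lowerChar (PySem.Chars.lowerChar c) = PySem.Chars.lowerChar c := by
  apply pvInj; simp only [pvLowerN]; split_ifs <;> omega

theorem pvAlphaN (c : Char) : PySem.Chars.isalpha c = decide ((65 ≤ c.toNat ∧ c.toNat ≤ 90) ∨ (97 ≤ c.toNat ∧ c.toNat ≤ 122)) := by
  unfold PySem.Chars.isalpha PySem.Chars.isupper PySem.Chars.islower
  simp only [← Bool.decide_and, ← Bool.decide_or, decide_eq_decide]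
  exact or_congr (and_congr (pvLe 'A' c) (pvLe c 'Z')) (and_congr (pvLe 'a' c) (pvLe c 'z'))

theorem pvF2 (c : Char) : PySem.Chars.isalpha (PySem.Chars.lowerChar c) = PySem.Chars.isalpha c := by
  rw [pvAlphaN, pvAlphaN, decide_eq_decide, pvLowerN]
  split_ifs <;> omega

theorem pvF5 (c : Char) (h : PySem.Chars.isalpha c = false) : PySem.Chars.lowerChar c = c := by
  rw [pvAlphaN] at h
  apply pvInj; rw [pvLowerN]
  simp only [decide_eq_false_iff_not, not_or] at h
  split_ifs with hh
  · exact absurd hh h.1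
  · rfl

-- B's fold accumulates exactly A's title-cased string, reversed
theorem pvFoldTitle (cs : List Char) (acc : List Char) (prev : Bool) :
    (cs.foldl titleStep (acc, prev)).1 = (pyTitleChars cs prev).reverse ++ acc := by
  induction cs generalizing acc prev with
  | nil => rfl
  | cons c rest ih =>
    rw [List.foldl_cons]
    unfold pyTitleChars
    by_cases h : PySem.Chars.isalpha c = true
    · rw [show titleStep (acc, prev) c
            = ((if prev then PySem.Chars.lowerChar c else PySem.Chars.upperChar c) :: acc, true)
          from by simp [titleStep, h], if_pos h]
      simp [ih]
    · rw [show titleStep (acc, prev) c = (c :: acc, false) from by simp [titleStep, h], if_neg h]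
      simp [ih]

-- lowering commutes with title-casing
theorem pvT1m (cs : List Char) (prev : Bool) :
    (pyTitleChars cs prev).map PySem.Chars.lowerChar = cs.map PySem.Chars.lowerChar := by
  induction cs generalizing prev with
  | nil => rfl
  | cons c rest ih =>
    unfold pyTitleChars
    by_cases h : PySem.Chars.isalpha c = true
    · rw [if_pos h]
      cases prev <;> simp [pvF1, pvF4, ih]
    · rw [if_neg h]
      simp only [List.map_cons, ih]

theorem pvT1 (cs : List Char) (prev : Bool) :
    PySem.Chars.lower (pyTitleChars cs prev) = PySem.Chars.lower cs := by
  unfold PySem.Chars.lower; exact pvT1m cs prev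

-- title-casing only looks at letters up to case
theorem pvT2 (cs : List Char) (prev : Bool) :
    pyTitleChars (PySem.Chars.lower cs) prev = pyTitleChars cs prev := by
  induction cs generalizing prev with
  | nil => rfl
  | cons c rest ih =>
    show pyTitleChars (PySem.Chars.lowerChar c :: PySem.Chars.lower rest) prev = _
    unfold pyTitleChars
    rw [pvF2]
    by_cases h : PySem.Chars.isalpha c = true
    · rw [if_pos h, if_pos h]
      cases prev <;> simp [pvF3, pvF4, ih]
    · rw [if_neg h, if_neg h, pvF5 c (Bool.not_eq_true _ ▸ h), ih]

-- the scan is a no-op on any title-cased string, given that every table entry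
-- is the title-case of its own lowering
theorem pvScanId (cs : List Char) (langs : List String)
    (h : ∀ l ∈ langs, pyTitleChars (PySem.Chars.lower l.toList) false = l.toList) :
    langScan (String.ofList (pyTitleChars cs false)) langs = String.ofList (pyTitleChars cs false) := by
  induction langs with
  | nil => rfl
  | cons lang rest ih =>
    unfold langScan
    split_ifs with hb
    · have hs : PySem.Str.lower (String.ofList (pyTitleChars cs false)) = PySem.Str.lower lang :=
        by simpa using hb
      have hl : PySem.Chars.lower (pyTitleChars cs false) = PySem.Chars.lower lang.toList := by
        have := congrArg String.toList hs
        simpa using this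
      have : pyTitleChars cs false = lang.toList := by
        calc pyTitleChars cs false
            = pyTitleChars (PySem.Chars.lower cs) false := (pvT2 cs false).symm
          _ = pyTitleChars (PySem.Chars.lower (pyTitleChars cs false)) false := by
                rw [pvT1]
          _ = pyTitleChars (PySem.Chars.lower lang.toList) false := by rw [hl]
          _ = lang.toList := h lang (List.mem_cons_self ..)
      rw [this]; simp
    · exact ih (fun l hm => h l (List.mem_cons_of_mem _ hm))

-- ===== VERDICT (by name: the statement is the Claim_ definition above) =====
theorem normalize_language_py_spec : Claim_equal_normalize_language_py := by
  intro value _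
  show normalize_language_py value = normalize_language_py_alt value
  unfold normalize_language_py normalize_language_py_alt
  rw [pvFoldTitle, List.append_nil, List.reverse_reverse]
  exact pvScanId _ _ (by decide)
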